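-- pv_equiv track=rewrite | github.com/kevinnbass/TestMaster | organized_codebase/testing/context_manager.py | _find_docstring_end
-- ===== SOURCE A (Python) =====
-- from typing import Any, Dict, List, Optional, Union, Callable
--
-- def _find_docstring_end(lines: List[str]) -> int:
--     """Find the end of a docstring."""
--     in_docstring = False
--     quote_type = None
--
--     for i, line in enumerate(lines):
--         stripped = line.strip()
--         if not in_docstring and (stripped.startswith('"""') or stripped.startswith("'''")):
--             quote_type = stripped[:3]
--             in_docstring = True
--             if stripped.count(quote_type) >= 2:  # Single line docstring
--                 return i
--         elif in_docstring and quote_type in line: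
--             return i
--
--     return 0  # Fallback
-- ===== SOURCE B (Python) =====
-- TRIPLE = ('"""', "'''")
--
-- def _find_docstring_end(lines):
--     # Index-based selection instead of a stateful sweep: precompute, per quote
--     # style, the indices of raw lines containing it, and the candidate opening
--     # lines; then pick the answer from the indexes.
--     occ = {q: [i for i, line in enumerate(lines) if q in line] for q in TRIPLE}
--     opens = [(i, line) for i, line in enumerate(lines) if line.strip().startswith(TRIPLE)]
--     if not opens:
--         return 0
--     o, line0 = opens[0]
--     s = line0.strip()
--     q = s[:3]
--     if s.count(q) >= 2:
--         return o
--     return next((j for j in occ[q] if j > o), 0)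
-- ===== Notes on version B (the rewrite author's own statement) =====
-- stated objective: alternative
-- what changed: Replaced A's flag-driven state-machine sweep with index-based selection: comprehensions precompute per-quote-style occurrence indices and the opening-candidate list, and the answer is picked from those indexes (first opening; first occurrence index past it).
import Mathlib
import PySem

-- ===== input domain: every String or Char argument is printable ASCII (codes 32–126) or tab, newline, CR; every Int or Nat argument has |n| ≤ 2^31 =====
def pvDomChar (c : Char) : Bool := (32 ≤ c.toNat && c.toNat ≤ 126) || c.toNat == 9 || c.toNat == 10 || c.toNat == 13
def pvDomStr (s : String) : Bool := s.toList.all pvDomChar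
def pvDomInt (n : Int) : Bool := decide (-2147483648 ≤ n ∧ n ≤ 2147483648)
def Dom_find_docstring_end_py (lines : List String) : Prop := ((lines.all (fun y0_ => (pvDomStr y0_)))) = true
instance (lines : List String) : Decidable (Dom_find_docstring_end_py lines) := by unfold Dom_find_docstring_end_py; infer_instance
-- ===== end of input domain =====

-- B replaces A's flag-driven state-machine sweep with index-based selection: comprehensions
-- precompute per-quote-style occurrence indices and the opening-candidate list, and the
-- answer is picked from those indexes ('alternative' decomposition, same cost).

-- ===== PORT A =====
-- A's single loop: state = (in_docstring, quote_type), i the enumerate counter.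
def pvLoopA : List String → Int → Bool → Option String → Int
  | [], _, _, _ => 0  -- fallback
  | line :: rest, i, ind, qt =>
    let stripped := PySem.Str.strip line
    if !ind && (PySem.Str.startswith stripped "\"\"\"" || PySem.Str.startswith stripped "'''") then
      let q := PySem.Str.slice stripped none (some 3)
      if PySem.Str.count stripped q ≥ 2 then i  -- single line docstring
      else pvLoopA rest (i + 1) true (some q)
    else if ind && (match qt with | some q => PySem.Str.isIn q line | none => false) then i
    else pvLoopA rest (i + 1) ind qt

def find_docstring_end_py (lines : List String) : Int := pvLoopA lines 0 false none

-- ===== PORT B =====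
-- [i for i, line in enumerate(lines) if q in line]
def pvOccIdx (q : String) : List String → Int → List Int
  | [], _ => []
  | line :: rest, i =>
    if PySem.Str.isIn q line then i :: pvOccIdx q rest (i + 1) else pvOccIdx q rest (i + 1)

-- [(i, line) for i, line in enumerate(lines) if line.strip().startswith(TRIPLE)]
def pvOpens : List String → Int → List (Int × String)
  | [], _ => []
  | line :: rest, i =>
    if PySem.Str.startswith (PySem.Str.strip line) "\"\"\"" ||
       PySem.Str.startswith (PySem.Str.strip line) "'''" then
      (i, line) :: pvOpens rest (i + 1)
    else pvOpens rest (i + 1)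

-- next((j for j in js if j > o), 0)
def pvFirstGT (o : Int) : List Int → Int
  | [] => 0
  | j :: rest => if j > o then j else pvFirstGT o rest

def find_docstring_end_py_alt (lines : List String) : Int :=
  let occ : PySem.Dict String (List Int) :=
    ((PySem.Dict.empty).insert "\"\"\"" (pvOccIdx "\"\"\"" lines 0)).insert "'''" (pvOccIdx "'''" lines 0)
  match pvOpens lines 0 with
  | [] => 0
  | (o, line0) :: _ =>
    let s := PySem.Str.strip line0
    let q := PySem.Str.slice s none (some 3)
    if PySem.Str.count s q ≥ 2 then o
    else pvFirstGT o (occ.getD q [])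

-- ===== PRECONDITION & SPEC =====
def Spec_find_docstring_end_py (lines : List String) (out : Int) : Prop := out = find_docstring_end_py_alt lines
instance (lines : List String) (out : Int) : Decidable (Spec_find_docstring_end_py lines out) := by unfold Spec_find_docstring_end_py; infer_instance

-- ===== CLAIM =====
def Claim_equal_find_docstring_end_py : Prop := ∀ (lines : List String), Dom_find_docstring_end_py lines → Spec_find_docstring_end_py lines (find_docstring_end_py lines)

-- ===== LEMMAS AND PROOFS =====

-- Every opening-candidate index produced from start i is ≥ i.
theorem pvOpens_ge : ∀ (ls : List String) (i o : Int) (l0 : String) (tl : List (Int × String)),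
    pvOpens ls i = (o, l0) :: tl → i ≤ o := by
  intro ls
  induction ls with
  | nil => intro i o l0 tl h; simp [pvOpens] at h
  | cons line rest ih =>
    intro i o l0 tl h
    simp only [pvOpens] at h
    split at h
    · cases h; omega
    · have := ih (i+1) o l0 tl h; omega

-- The head of the opening-candidate list satisfies the opening test.
theorem pvOpens_head_sw : ∀ (ls : List String) (i o : Int) (l0 : String) (tl : List (Int × String)),
    pvOpens ls i = (o, l0) :: tl →
    (PySem.Str.startswith (PySem.Str.strip l0) "\"\"\"" ||
     PySem.Str.startswith (PySem.Str.strip l0) "'''") = true := by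
  intro ls
  induction ls with
  | nil => intro i o l0 tl h; simp [pvOpens] at h
  | cons line rest ih =>
    intro i o l0 tl h
    simp only [pvOpens] at h
    split at h
    · cases h; assumption
    · exact ih (i+1) o l0 tl h

-- A's in-docstring scan = first occurrence index past o, when the scan starts past o.
theorem pvInside_eq_firstGT (q : String) : ∀ (ls : List String) (i o : Int), o < i →
    pvLoopA ls i true (some q) = pvFirstGT o (pvOccIdx q ls i) := by
  intro ls
  induction ls with
  | nil => intro i o _; rfl
  | cons line rest ih =>
    intro i o ho
    simp only [pvLoopA, pvOccIdx, Bool.not_true, Bool.false_and, Bool.true_and]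
    rw [if_neg Bool.false_ne_true]
    by_cases h : PySem.Str.isIn q line = true
    · rw [if_pos h, if_pos h]
      simp only [pvFirstGT]
      rw [if_pos (by omega)]
    · rw [if_neg h, if_neg h]
      exact ih (i+1) o (by omega)

-- An occurrence index at position i ≤ o is skipped by pvFirstGT o.
theorem pvFirstGT_skip (q : String) (line : String) (rest : List String) (i o : Int) (h : i ≤ o) :
    pvFirstGT o (pvOccIdx q (line :: rest) i) = pvFirstGT o (pvOccIdx q rest (i + 1)) := by
  simp only [pvOccIdx]
  split
  · simp only [pvFirstGT]; rw [if_neg (by omega)]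
  · rfl

-- Main generalized equivalence of the two structures (occurrence list taken on the same suffix).
theorem pvMain : ∀ (ls : List String) (i : Int),
    pvLoopA ls i false none =
      (match pvOpens ls i with
       | [] => 0
       | (o, line0) :: _ =>
         let s := PySem.Str.strip line0
         let q := PySem.Str.slice s none (some 3)
         if PySem.Str.count s q ≥ 2 then o
         else pvFirstGT o (pvOccIdx q ls i)) := by
  intro ls
  induction ls with
  | nil => intro i; rfl
  | cons line rest ih =>
    intro i
    by_cases hop : (PySem.Str.startswith (PySem.Str.strip line) "\"\"\"" ||
        PySem.Str.startswith (PySem.Str.strip line) "'''") = true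
    · conv_lhs => simp only [pvLoopA]
      rw [show pvOpens (line :: rest) i = (i, line) :: pvOpens rest (i+1) by
        simp only [pvOpens]; rw [if_pos hop]]
      simp only [Bool.not_false, Bool.true_and]
      rw [if_pos hop]
      by_cases hc : PySem.Str.count (PySem.Str.strip line)
          (PySem.Str.slice (PySem.Str.strip line) none (some 3)) ≥ 2
      · rw [if_pos hc, if_pos hc]
      · rw [if_neg hc, if_neg hc]
        rw [pvFirstGT_skip _ _ _ _ _ (le_refl i)]
        exact pvInside_eq_firstGT _ rest (i+1) i (by omega)
    · conv_lhs => simp only [pvLoopA]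
      simp only [Bool.not_false, Bool.true_and, Bool.false_and]
      rw [if_neg hop, if_neg Bool.false_ne_true]
      rw [ih (i+1)]
      rw [show pvOpens (line :: rest) i = pvOpens rest (i+1) by
        simp only [pvOpens]; rw [if_neg hop]]
      cases hpo : pvOpens rest (i+1) with
      | nil => rfl
      | cons p tl =>
        obtain ⟨o, l0⟩ := p
        have hge : i + 1 ≤ o := pvOpens_ge rest (i+1) o l0 tl hpo
        dsimp only
        by_cases hc : PySem.Str.count (PySem.Str.strip l0)
            (PySem.Str.slice (PySem.Str.strip l0) none (some 3)) ≥ 2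
        · rw [if_pos hc, if_pos hc]
        · rw [if_neg hc, if_neg hc]
          rw [pvFirstGT_skip _ _ _ _ _ (by omega)]

-- If s starts with the 3-character quote q, then s[:3] = q.
theorem pvSlice3_of_startswith (s q : String) (h3 : q.toList.length = 3)
    (h : PySem.Str.startswith s q = true) : PySem.Str.slice s none (some 3) = q := by
  simp [PySem.Chars.startswith] at h
  obtain ⟨t, ht⟩ := h
  unfold PySem.Str.slice
  rw [PySem.Chars.slice_eq_listSlice,
    show ((3:Int) = ((3:Nat):Int)) by norm_num, PySem.List.slice_to_natCast]
  rw [← ht, List.take_append_of_le_length (by omega), List.take_of_length_le (by omega)]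
  exact String.ofList_toList

-- ===== VERDICT =====
theorem find_docstring_end_py_spec : Claim_equal_find_docstring_end_py := by
  intro lines _
  unfold Spec_find_docstring_end_py find_docstring_end_py find_docstring_end_py_alt
  rw [pvMain lines 0]
  cases hpo : pvOpens lines 0 with
  | nil => rfl
  | cons p tl =>
    obtain ⟨o, l0⟩ := p
    dsimp only
    by_cases hc : PySem.Str.count (PySem.Str.strip l0)
        (PySem.Str.slice (PySem.Str.strip l0) none (some 3)) ≥ 2
    · rw [if_pos hc, if_pos hc]
    · rw [if_neg hc, if_neg hc]
      rcases Bool.or_eq_true_iff.mp (pvOpens_head_sw lines 0 o l0 tl hpo) with h | h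
      · rw [pvSlice3_of_startswith _ _ (by decide) h,
          PySem.Dict.getD_insert, if_neg (by decide), PySem.Dict.getD_insert, if_pos rfl]
      · rw [pvSlice3_of_startswith _ _ (by decide) h,
          PySem.Dict.getD_insert, if_pos rfl]
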